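-- pv_equiv track=rewrite | github.com/folkemat/KoboPatchFan | kobopatchfan/loadDataThreadClass.py | findMore
-- ===== SOURCE A (Python) =====
-- def findMore(patch_name, lines):
--     #Search for the corresponding code for each patch name
--     i = 0
--     more_text = ""
--     while i < len(lines):
--         if (patch_name in lines[i]) and not (lines[i].startswith('#') or lines[i].startswith(' ')): #check if patch-name is not a comment
--             for j in range(i+1, len(lines)):
--                 if lines[j].startswith(' ') or lines[j].startswith('#') or len(lines[j].strip()) == 0: #A new patch block starts without spaces etc.
--                     more_text += lines[j]
--                 else:
--                     break
--         i += 1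
--     return more_text
-- ===== SOURCE B (Python) =====
-- def findMore(patch_name, lines):
--     # Single pass with a 'collecting' flag instead of a nested rescan of the tail after every match.
--     def is_continuation(line):
--         return line.startswith((' ', '#')) or line.strip() == ''
--     def is_match(line):
--         return (patch_name in line) and not line.startswith(('#', ' '))
--     more_text = ""
--     collecting = False
--     for line in lines:
--         if collecting and is_continuation(line):
--             more_text += line
--         if not is_continuation(line):
--             collecting = False
--         if is_match(line):
--             collecting = True
--     return more_text
-- ===== Notes on version B (the rewrite author's own statement) =====
-- stated objective: alternative
-- what changed: Replaced the outer while loop that rescans the tail after every matching line (nested inner for) with a single pass over lines carrying a boolean 'collecting' flag that appends each continuation line at most once.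
-- intended difference: When patch_name is empty or whitespace-only, a blank separator line inside a collected block itself counts as a match for A, which then re-appends the following continuation lines a second time (duplicated output text); B appends each continuation line once, which is the intended behaviour of collecting each block's text. — e.g. on findMore("", ["a", "", " x"]): A returns " x x", B returns " x"
import Mathlib
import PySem

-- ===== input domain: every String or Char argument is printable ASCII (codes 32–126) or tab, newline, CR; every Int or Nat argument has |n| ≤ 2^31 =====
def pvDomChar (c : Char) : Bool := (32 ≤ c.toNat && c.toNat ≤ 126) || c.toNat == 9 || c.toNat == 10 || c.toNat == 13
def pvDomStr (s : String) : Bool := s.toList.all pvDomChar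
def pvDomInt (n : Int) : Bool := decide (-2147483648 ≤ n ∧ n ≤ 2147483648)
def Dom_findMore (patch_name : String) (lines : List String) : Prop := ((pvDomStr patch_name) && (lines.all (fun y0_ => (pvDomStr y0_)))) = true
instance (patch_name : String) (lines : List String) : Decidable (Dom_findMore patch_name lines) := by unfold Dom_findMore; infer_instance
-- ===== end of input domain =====

-- B replaces A's rescan-after-every-match (outer while + inner for) by ONE pass with a boolean
-- 'collecting' flag; on empty/whitespace-only patch_name A duplicates continuation text (see D_ below).

-- ===== PORT A =====
-- A's two repeated conditions, verbatim: `lines[j].startswith(' ') or lines[j].startswith('#') or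
-- len(lines[j].strip()) == 0` and `(patch_name in lines[i]) and not (lines[i].startswith('#') or
-- lines[i].startswith(' '))`
def contA (l : String) : Bool :=
  PySem.Str.startswith l " " || PySem.Str.startswith l "#"
    || (PySem.Str.len (PySem.Str.strip l) == 0)

def matchA (patch_name l : String) : Bool :=
  PySem.Str.isIn patch_name l
    && !(PySem.Str.startswith l "#" || PySem.Str.startswith l " ")

-- inner `for j in range(i+1, len(lines))` with break: appends while the line is a continuation
def findMoreRun : List String → String
  | [] => ""
  | l :: ls => if contA l then l ++ findMoreRun ls else ""

-- outer `while i < len(lines)`: iteration i sees lines[i] (= l) and the tail lines[i+1:] (= ls)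
def findMoreGo (patch_name : String) : List String → String → String
  | [], acc => acc
  | l :: ls, acc =>
    findMoreGo patch_name ls
      (if matchA patch_name l then acc ++ findMoreRun ls else acc)

def findMore (patch_name : String) (lines : List String) : String :=
  findMoreGo patch_name lines ""

-- ===== PORT B =====
-- B's local helper is_continuation (B's is_match is literally A's match condition matchA)
def pvIsCont (l : String) : Bool :=
  PySem.Str.startswith l " " || PySem.Str.startswith l "#" || PySem.Str.strip l == ""

def findMore_alt (patch_name : String) (lines : List String) : String :=
  (lines.foldl (fun (st : String × Bool) line =>
    let more := if st.2 && pvIsCont line then st.1 ++ line else st.1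
    let col := if !(pvIsCont line) then false else st.2
    let col := if matchA patch_name line then true else col
    (more, col)) ("", false)).1

-- ===== PRECONDITION & SPEC =====
-- On inputs whose patch_name is empty or whitespace-only, a blank separator line inside a collected
-- block itself matches, so A re-appends the continuation lines after it a second time (duplicated
-- text); B appends each continuation line once, the intended behaviour. D_ (stated through the two
-- line conditions of A) holds exactly when such an input shape exists: two matching lines j < k with
-- a nonempty line m > k such that every line after j up to m is a continuation line.
def D_findMore (patch_name : String) (lines : List String) : Prop :=
  ∃ m < lines.length, lines.getD m "" ≠ "" ∧
    ∃ k < m, matchA patch_name (lines.getD k "") ∧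
      ∃ j < k, matchA patch_name (lines.getD j "") ∧
        ∀ t ≤ m, j < t → contA (lines.getD t "")

instance (patch_name : String) (lines : List String) : Decidable (D_findMore patch_name lines) := by
  unfold D_findMore; infer_instance

def Spec_findMore (patch_name : String) (lines : List String) (out : String) : Prop :=
  ¬ D_findMore patch_name lines → out = findMore_alt patch_name lines
instance (patch_name : String) (lines : List String) (out : String) : Decidable (Spec_findMore patch_name lines out) := by unfold Spec_findMore; infer_instance

def pvDiffWitness_findMore : String × List String := ("", ["a", "", " x"])
def pvDiffWitnessOut_findMore : String × String := (" x x", " x")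

-- ===== CLAIM (what is proved, stated in full; the proofs are below) =====
def Claim_unchanged_findMore : Prop := ∀ (patch_name : String) (lines : List String), Dom_findMore patch_name lines → Spec_findMore patch_name lines (findMore patch_name lines)
def Claim_changed_findMore : Prop := Dom_findMore (pvDiffWitness_findMore.1) (pvDiffWitness_findMore.2) ∧ D_findMore (pvDiffWitness_findMore.1) (pvDiffWitness_findMore.2) ∧ findMore (pvDiffWitness_findMore.1) (pvDiffWitness_findMore.2) = pvDiffWitnessOut_findMore.1 ∧ findMore_alt (pvDiffWitness_findMore.1) (pvDiffWitness_findMore.2) = pvDiffWitnessOut_findMore.2 ∧ pvDiffWitnessOut_findMore.1 ≠ pvDiffWitnessOut_findMore.2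
def Claim_exact_findMore : Prop := ∀ (patch_name : String) (lines : List String), Dom_findMore patch_name lines → D_findMore patch_name lines → findMore patch_name lines ≠ findMore_alt patch_name lines

-- ===== LEMMAS AND PROOFS =====

-- A's continuation condition (`len(strip(l)) == 0` last disjunct) equals B's (`strip(l) == ''`)
lemma len_beq_zero (s : String) : (PySem.Str.len s == 0) = (s == "") := by
  rw [Bool.eq_iff_iff]
  simp [PySem.Str.len_eq]

lemma contA_eq (l : String) : contA l = pvIsCont l := by
  rw [contA, pvIsCont, len_beq_zero]

-- A's result as a structural recursion over suffixes
def agoA (patch_name : String) : List String → String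
  | [] => ""
  | l :: ls => (if matchA patch_name l then findMoreRun ls else "") ++ agoA patch_name ls

lemma findMoreGo_eq (patch_name : String) (ls : List String) :
    ∀ acc, findMoreGo patch_name ls acc = acc ++ agoA patch_name ls := by
  induction ls with
  | nil => intro acc; simp [findMoreGo, agoA]
  | cons l ls ih =>
    intro acc
    rw [findMoreGo, agoA, ih]
    by_cases h : matchA patch_name l = true
    · simp [h, String.append_assoc]
    · simp [h]

-- B's result from state b, ignoring the accumulator
def bresB (patch_name : String) : Bool → List String → String
  | _, [] => ""
  | b, l :: ls =>
    (if b && pvIsCont l then l else "")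
      ++ bresB patch_name (matchA patch_name l || (pvIsCont l && b)) ls

lemma foldB_eq (patch_name : String) (ls : List String) :
    ∀ (acc : String) (b : Bool),
      (ls.foldl (fun (st : String × Bool) line =>
        let more := if st.2 && pvIsCont line then st.1 ++ line else st.1
        let col := if !(pvIsCont line) then false else st.2
        let col := if matchA patch_name line then true else col
        (more, col)) (acc, b)).1 = acc ++ bresB patch_name b ls := by
  induction ls with
  | nil => intro acc b; simp [bresB]
  | cons l ls ih =>
    intro acc b
    rw [List.foldl_cons]
    show (ls.foldl _ (if b && pvIsCont l then acc ++ l else acc,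
      if matchA patch_name l then true else if !(pvIsCont l) then false else b)).1 = _
    rw [ih, bresB]
    cases hb : b <;> cases hc : pvIsCont l <;> cases hm : matchA patch_name l <;>
      simp [String.append_assoc]

-- nonempty continuation content ahead (what the inner loop would re-append for an overlap line)
def hasDup : List String → Bool
  | [] => false
  | l :: ls => pvIsCont l && (l != "" || hasDup ls)

-- the difference region, phrased as the recursion the proofs use
def dgen (patch_name : String) : Bool → List String → Bool
  | _, [] => false
  | b, l :: ls =>
    (matchA patch_name l && pvIsCont l && b && hasDup ls)
      || dgen patch_name (matchA patch_name l || (pvIsCont l && b)) ls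

lemma run_empty_of_not_hasDup (s : List String) (h : hasDup s = false) : findMoreRun s = "" := by
  induction s with
  | nil => rfl
  | cons l ls ih =>
    rw [hasDup, Bool.and_eq_false_iff] at h
    rw [findMoreRun, contA_eq]
    rcases h with h | h
    · simp [h]
    · rw [Bool.or_eq_false_iff, bne_eq_false_iff_eq] at h
      by_cases hc : pvIsCont l = true
      · simp [h.1, ih h.2]
      · simp [hc]

-- MAIN INVARIANT: outside the difference region, B from state b computes A's open block plus A's rest
lemma bres_eq (patch_name : String) (s : List String) :
    ∀ b, dgen patch_name b s = false →
      bresB patch_name b s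
        = (if b then findMoreRun s else "") ++ agoA patch_name s := by
  induction s with
  | nil => intro b _; cases b <;> rfl
  | cons l ls ih =>
    intro b hd
    rw [dgen, Bool.or_eq_false_iff] at hd
    obtain ⟨hd1, hd2⟩ := hd
    rw [bresB, ih _ hd2, agoA, findMoreRun, contA_eq]
    cases hb : b <;> cases hc : pvIsCont l <;> cases hm : matchA patch_name l <;>
      simp_all [String.append_assoc]
    -- remaining case: overlap while collecting; the re-appended run must be empty
    rw [run_empty_of_not_hasDup ls hd1]
    simp

-- the D_-side predicates agree with B's helpers (pvDCont on domain strings)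
-- D_ (index form) agrees with the recursion dgen
lemma hasDup_iff (u : List String) :
    hasDup u = true ↔ ∃ m, m < u.length ∧
      (∀ t, t ≤ m → pvIsCont (u.getD t "") = true) ∧ u.getD m "" ≠ "" := by
  induction u with
  | nil => simp [hasDup]
  | cons l ls ih =>
    rw [hasDup]
    constructor
    · intro h
      rw [Bool.and_eq_true] at h
      have h2 := h.2
      rw [Bool.or_eq_true] at h2
      rcases h2 with h2 | h2
      · exact ⟨0, by simp, by intro t ht; interval_cases t; simpa using h.1,
          by simpa using h2⟩
      · obtain ⟨m, hm, hall, hne⟩ := ih.1 h2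
        refine ⟨m + 1, by simpa using hm, ?_, by simpa using hne⟩
        intro t ht
        cases t with
        | zero => simpa using h.1
        | succ t => exact hall t (by omega)
    · rintro ⟨m, hm, hall, hne⟩
      have hc : pvIsCont l = true := by simpa using hall 0 (by omega)
      rw [hc, Bool.true_and]
      cases m with
      | zero =>
        simp only [List.getD_cons_zero] at hne
        simp [hne]
      | succ m =>
        have : hasDup ls = true := ih.2 ⟨m, by simpa using hm,
          fun t ht => by simpa using hall (t + 1) (by omega), by simpa using hne⟩
        simp [this]

lemma dgen_iff (patch_name : String) (s : List String) :
    ∀ b, dgen patch_name b s = true ↔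
      ∃ k, k < s.length ∧
        (matchA patch_name (s.getD k "") && pvIsCont (s.getD k "")) = true ∧
        ((b = true ∧ ∀ t, t < k → pvIsCont (s.getD t "") = true) ∨
          (∃ j, j < k ∧ matchA patch_name (s.getD j "") = true ∧
            ∀ t, t < k → j < t → pvIsCont (s.getD t "") = true)) ∧
        hasDup (s.drop (k + 1)) = true := by
  induction s with
  | nil => intro b; simp [dgen]
  | cons l ls ih =>
    intro b
    rw [dgen, Bool.or_eq_true, ih]
    constructor
    · rintro (h | ⟨k, hk, hov, hcol, hdup⟩)
      · -- difference at the head line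
        simp only [Bool.and_eq_true] at h
        exact ⟨0, by simp, by simp [h.1.1.1, h.1.1.2], Or.inl ⟨h.1.2, by omega⟩,
          by simpa using h.2⟩
      · -- difference inside the tail, with start state (match l || (cont l && b)); shift indices
        refine ⟨k + 1, by simpa using hk, by simpa using hov, ?_, by simpa using hdup⟩
        rcases hcol with ⟨hstep, hall⟩ | ⟨j, hj, hjm, hall⟩
        · rw [Bool.or_eq_true] at hstep
          rcases hstep with hm | hcb
          · -- head matches: it is the j witness
            refine Or.inr ⟨0, by omega, by simpa using hm, ?_⟩
            intro t ht h0t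
            cases t with
            | zero => omega
            | succ t => simpa using hall t (by omega)
          · -- head is a continuation and we were already collecting
            rw [Bool.and_eq_true] at hcb
            refine Or.inl ⟨hcb.2, ?_⟩
            intro t ht
            cases t with
            | zero => simpa using hcb.1
            | succ t => simpa using hall t (by omega)
        · refine Or.inr ⟨j + 1, by omega, by simpa using hjm, ?_⟩
          intro t ht hjt
          cases t with
          | zero => omega
          | succ t => simpa using hall t (by omega) (by omega)
    · rintro ⟨k, hk, hov, hcol, hdup⟩
      cases k with
      | zero =>
        left
        simp only [List.getD_cons_zero] at hov
        rw [Bool.and_eq_true] at hov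
        have hb : b = true := by
          rcases hcol with ⟨hb, -⟩ | ⟨j, hj, -⟩
          · exact hb
          · omega
        simp only [List.drop_succ_cons, List.drop_zero] at hdup
        simp [hov.1, hov.2, hb, hdup]
      | succ k =>
        right
        refine ⟨k, by simpa using hk, by simpa using hov, ?_, by simpa using hdup⟩
        rcases hcol with ⟨hb, hall⟩ | ⟨j, hj, hjm, hall⟩
        · -- was collecting through the head: head is a continuation
          have hc : pvIsCont l = true := by simpa using hall 0 (by omega)
          exact Or.inl ⟨by simp [hb, hc], fun t ht => by simpa using hall (t + 1) (by omega)⟩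
        · cases j with
          | zero =>
            -- the j witness is the head line: step state is true
            have hm : matchA patch_name l = true := by simpa using hjm
            exact Or.inl ⟨by simp [hm], fun t ht => by simpa using hall (t + 1) (by omega) (by omega)⟩
          | succ j =>
            exact Or.inr ⟨j, by omega, by simpa using hjm,
              fun t ht hjt => by simpa using hall (t + 1) (by omega) (by omega)⟩

lemma getD_drop_str (lines : List String) (k t : Nat) :
    (lines.drop k).getD t "" = lines.getD (k + t) "" := by
  simp [List.getD, List.getElem?_drop]

lemma D_iff_dgen (patch_name : String) (lines : List String) :
    D_findMore patch_name lines ↔ dgen patch_name false lines = true := by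
  rw [dgen_iff, D_findMore]
  simp only [contA_eq]
  constructor
  · rintro ⟨m, hm, hne, k, hkm, hMk, j, hjk, hMj, hall⟩
    have hCk : pvIsCont (lines.getD k "") = true := hall k (by omega) (by omega)
    refine ⟨k, by omega, by rw [Bool.and_eq_true]; exact ⟨hMk, hCk⟩, Or.inr ⟨j, hjk, hMj,
      fun t ht hjt => hall t (by omega) hjt⟩, ?_⟩
    rw [hasDup_iff]
    refine ⟨m - (k + 1), by rw [List.length_drop]; omega, ?_, ?_⟩
    · intro t ht
      rw [getD_drop_str]
      exact hall (k + 1 + t) (by omega) (by omega)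
    · rw [getD_drop_str, show k + 1 + (m - (k + 1)) = m by omega]
      exact hne
  · rintro ⟨k, hk, hov, hcol, hdup⟩
    rw [Bool.and_eq_true] at hov
    rcases hcol with ⟨hfalse, -⟩ | ⟨j, hjk, hMj, hall⟩
    · exact absurd hfalse (by simp)
    rw [hasDup_iff] at hdup
    obtain ⟨m', hm', hallm, hnem⟩ := hdup
    rw [List.length_drop] at hm'
    rw [getD_drop_str] at hnem
    refine ⟨k + 1 + m', by omega, hnem, k, by omega, hov.1, j, hjk, hMj, ?_⟩
    intro t htm hjt
    rcases lt_trichotomy t k with h | h | h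
    · exact hall t h hjt
    · rw [h]; exact hov.2
    · have hb := hallm (t - (k + 1)) (by omega)
      rw [getD_drop_str, show k + 1 + (t - (k + 1)) = t by omega] at hb
      exact hb

-- tightness: inside D_ the duplicated run is nonempty, so A's output is strictly longer than B's
lemma sum_len (a b : String) : (a ++ b).toList.length = a.toList.length + b.toList.length := by
  rw [String.toList_append, List.length_append]

lemma runP_pos (s : List String) (h : hasDup s = true) : 0 < (findMoreRun s).toList.length := by
  induction s with
  | nil => simp [hasDup] at h
  | cons l ls ih =>
    rw [hasDup, Bool.and_eq_true] at h
    rw [findMoreRun, contA_eq, if_pos h.1, sum_len]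
    have h2 := h.2
    rw [Bool.or_eq_true, bne_iff_ne] at h2
    rcases h2 with h2 | h2
    · have : l.toList ≠ [] := fun hn => h2 (String.toList_eq_nil_iff.1 hn)
      have := List.length_pos_of_ne_nil this
      omega
    · have := ih h2
      omega

lemma bres_le (patch_name : String) (s : List String) :
    ∀ b, (bresB patch_name b s).toList.length ≤
      ((if b then findMoreRun s else "") ++ agoA patch_name s).toList.length := by
  induction s with
  | nil => intro b; cases b <;> simp [bresB, findMoreRun, agoA]
  | cons l ls ih =>
    intro b
    rw [bresB, agoA, findMoreRun, contA_eq]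
    have ih1 := ih (matchA patch_name l || (pvIsCont l && b))
    cases hb : b <;> cases hc : pvIsCont l <;> cases hm : matchA patch_name l <;>
      (try simp [hb, hc, hm, sum_len] at ih1 ⊢) <;> omega

lemma bres_lt (patch_name : String) (s : List String) :
    ∀ b, dgen patch_name b s = true →
      (bresB patch_name b s).toList.length <
      ((if b then findMoreRun s else "") ++ agoA patch_name s).toList.length := by
  induction s with
  | nil => intro b h; simp [dgen] at h
  | cons l ls ih =>
    intro b hd
    rw [dgen, Bool.or_eq_true] at hd
    rw [bresB, agoA, findMoreRun, contA_eq]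
    rcases hd with hd | hd
    · simp only [Bool.and_eq_true] at hd
      obtain ⟨⟨⟨hm, hc⟩, hb⟩, hdup⟩ := hd
      have h1 := bres_le patch_name ls true
      have h2 := runP_pos ls hdup
      simp [hm, hc, hb, sum_len] at h1 h2 ⊢
      omega
    · have ih1 := ih _ hd
      have h1 := bres_le patch_name ls (matchA patch_name l || (pvIsCont l && b))
      cases hb : b <;> cases hc : pvIsCont l <;> cases hm : matchA patch_name l <;>
        (try simp [hb, hc, hm, sum_len] at ih1 h1 ⊢) <;> omega


-- ===== VERDICT (by name: the statement is the Claim_ definition above) =====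
theorem findMore_spec : Claim_unchanged_findMore := by
  intro patch_name lines _ hnd
  have hd : dgen patch_name false lines = false := by
    rcases h : dgen patch_name false lines with _ | _
    · rfl
    · exact absurd ((D_iff_dgen patch_name lines).2 h) hnd
  unfold findMore findMore_alt
  rw [findMoreGo_eq, foldB_eq, bres_eq patch_name lines false hd]
  simp

theorem findMore_changed : Claim_changed_findMore := by
  unfold Claim_changed_findMore; decide

theorem findMore_tight : Claim_exact_findMore := by
  intro patch_name lines _ hD heq
  have hd := (D_iff_dgen patch_name lines).1 hD
  have hlt := bres_lt patch_name lines false hd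
  have e1 : findMore patch_name lines = agoA patch_name lines := by
    rw [findMore, findMoreGo_eq]; simp
  have e2 : findMore_alt patch_name lines = bresB patch_name false lines := by
    rw [findMore_alt, foldB_eq]; simp
  rw [e1, e2] at heq
  rw [heq, if_neg (by simp)] at hlt
  simp at hlt
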